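-- pv_equiv track=rewrite | github.com/nhan3108/api-sun-vanwnhat | app.py | rule6
-- ===== SOURCE A (Python) =====
-- def get_tai_xiu(total):
--     return "Tài" if 11 <= total <= 18 else "Xỉu"
--
-- def rule6(totals):  # Chuỗi Tài hoặc Xỉu liên tiếp
--     types = [get_tai_xiu(x) for x in totals]
--     chain = 1
--     for i in range(len(types)-1, 0, -1):
--         if types[i] == types[i-1]: chain += 1
--         else: break
--     if chain >= 4:
--         return "Xỉu" if types[-1]=="Tài" else "Tài", 78, f"{chain} lần {types[-1]} liên tiếp"
-- ===== SOURCE B (Python) =====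
-- def rule6(totals):
--     # single forward pass maintaining (current run label, run length); no list materialised, no break
--     cur = None
--     chain = 0
--     for x in totals:
--         lab = "Tài" if 11 <= x <= 18 else "Xỉu"
--         if lab == cur:
--             chain += 1
--         else:
--             cur, chain = lab, 1
--     if chain >= 4:
--         return ("Xỉu" if cur == "Tài" else "Tài"), 78, f"{chain} lần {cur} liên tiếp"
--     return None
-- ===== Notes on version B (the rewrite author's own statement) =====
-- stated objective: idiomatic
-- what changed: Replaces A's materialised label list plus early-breaking backward index scan with a single forward pass that maintains the current run's label and length; the final state is exactly the trailing run.
import Mathlib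
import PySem

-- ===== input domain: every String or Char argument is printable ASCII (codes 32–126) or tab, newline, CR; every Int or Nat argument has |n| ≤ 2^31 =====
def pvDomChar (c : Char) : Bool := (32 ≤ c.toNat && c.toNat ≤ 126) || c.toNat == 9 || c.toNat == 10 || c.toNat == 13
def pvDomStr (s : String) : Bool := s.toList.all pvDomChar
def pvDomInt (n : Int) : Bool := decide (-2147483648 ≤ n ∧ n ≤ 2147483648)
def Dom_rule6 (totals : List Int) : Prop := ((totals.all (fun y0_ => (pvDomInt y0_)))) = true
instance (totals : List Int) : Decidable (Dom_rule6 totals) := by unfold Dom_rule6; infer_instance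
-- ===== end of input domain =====

-- B replaces A's materialised label list + early-breaking backward index scan with one
-- forward pass keeping (current run label, run length); objective: more idiomatic. Same O(n) cost.

-- ===== PORT A =====
def pvLabA (x : Int) : String := if 11 ≤ x ∧ x ≤ 18 then "Tài" else "Xỉu"

def pvLoopA (types : List String) : List Int → Int → Int
  | [], chain => chain
  | i :: rest, chain =>
    if PySem.List.pyGet? types i = PySem.List.pyGet? types (i - 1)
    then pvLoopA types rest (chain + 1) else chain

def rule6 (totals : List Int) : Option (String × Int × String) :=
  let types := totals.map pvLabA
  let chain := pvLoopA types (PySem.List.pyRange ((types.length : Int) - 1) 0 (-1)) 1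
  if chain ≥ 4 then
    let last := (PySem.List.pyGet? types (-1)).getD ""   -- reachable only with nonempty types
    some ((if last = "Tài" then "Xỉu" else "Tài"), 78,
      PySem.Int.toStr chain ++ " lần " ++ last ++ " liên tiếp")
  else none

-- ===== PORT B =====
def pvStepB (s : Option String × Int) (x : Int) : Option String × Int :=
  let lab := if 11 ≤ x ∧ x ≤ 18 then "Tài" else "Xỉu"
  if some lab = s.1 then (s.1, s.2 + 1) else (some lab, 1)

def rule6_alt (totals : List Int) : Option (String × Int × String) :=
  let s := totals.foldl pvStepB (none, 0)
  if s.2 ≥ 4 then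
    let cur := s.1.getD ""   -- reachable only when s.1 = some _
    some ((if cur = "Tài" then "Xỉu" else "Tài"), 78,
      PySem.Int.toStr s.2 ++ " lần " ++ cur ++ " liên tiếp")
  else none

-- ===== PRECONDITION & SPEC =====
def Spec_rule6 (totals : List Int) (out : Option (String × Int × String)) : Prop := out = rule6_alt totals
instance (totals : List Int) (out : Option (String × Int × String)) : Decidable (Spec_rule6 totals out) := by unfold Spec_rule6; infer_instance

-- ===== CLAIM (what is proved, stated in full; the proofs are below) =====
def Claim_equal_rule6 : Prop := ∀ (totals : List Int), Dom_rule6 totals → Spec_rule6 totals (rule6 totals)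

-- ===== LEMMAS AND PROOFS =====

-- spec of the trailing run, on the REVERSED label list
def sCnt (l : String) : List String → Int
  | [] => 0
  | b :: r => if b = l then 1 + sCnt l r else 0

def sRun : List String → Int
  | [] => 0
  | a :: r => 1 + sCnt a r

theorem loopA_acc (types : List String) (is : List Int) (c k : Int) :
    pvLoopA types is (c + k) = pvLoopA types is c + k := by
  induction is generalizing c with
  | nil => rfl
  | cons i rest ih =>
    simp only [pvLoopA]
    split_ifs with h
    · have := ih (c + 1)
      simpa [add_comm, add_left_comm, add_assoc] using this
    · rfl

theorem loopA_drop_last (ys : List String) (x : String) (is : List Int) (c : Int)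
    (hb : ∀ i ∈ is, 1 ≤ i ∧ i ≤ (ys.length : Int) - 1) :
    pvLoopA (ys ++ [x]) is c = pvLoopA ys is c := by
  induction is generalizing c with
  | nil => rfl
  | cons i rest ih =>
    obtain ⟨h1, h2⟩ := hb i (by simp)
    have hget : ∀ j : Int, 0 ≤ j → j ≤ (ys.length : Int) - 1 →
        PySem.List.pyGet? (ys ++ [x]) j = PySem.List.pyGet? ys j := by
      intro j hj0 hj1
      rw [PySem.List.pyGet?_of_nonneg _ hj0, PySem.List.pyGet?_of_nonneg _ hj0]
      rw [List.getElem?_append_left (by omega)]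
    simp only [pvLoopA, hget i (by omega) h2, hget (i - 1) (by omega) (by omega)]
    split_ifs with h
    · exact ih _ (fun j hj => hb j (by simp [hj]))
    · rfl

theorem lemmaA (ys : List Int) : ∀ a : Int,
    pvLoopA (ys.map pvLabA ++ [pvLabA a]) (PySem.List.pyRange (ys.length : Int) 0 (-1)) 1
      = sRun (pvLabA a :: (ys.map pvLabA).reverse) := by
  induction ys using List.reverseRecOn with
  | nil =>
    intro a
    rw [PySem.List.pyRange_neg_one_eq_nil (by simp)]
    simp [pvLoopA, sRun, sCnt]
  | append_singleton ys b ih =>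
    intro a
    have hlen : ((ys ++ [b]).length : Int) = (ys.length : Int) + 1 := by simp
    rw [hlen, PySem.List.pyRange_neg_one_cons (by omega)]
    have htypes : (ys ++ [b]).map pvLabA ++ [pvLabA a]
        = (ys.map pvLabA ++ [pvLabA b]) ++ [pvLabA a] := by simp
    rw [htypes]
    simp only [pvLoopA]
    have hlen2 : ((ys.map pvLabA ++ [pvLabA b]).length : Int) = (ys.length : Int) + 1 := by simp
    have hgettop : PySem.List.pyGet? ((ys.map pvLabA ++ [pvLabA b]) ++ [pvLabA a])
        ((ys.length : Int) + 1) = some (pvLabA a) := by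
      rw [show ((ys.length : Int) + 1) = (((ys.map pvLabA ++ [pvLabA b]).length : Nat) : Int) by
        simp]
      rw [PySem.List.pyGet?_natCast]
      simp
    have hgetsnd : PySem.List.pyGet? ((ys.map pvLabA ++ [pvLabA b]) ++ [pvLabA a])
        ((ys.length : Int) + 1 - 1) = some (pvLabA b) := by
      have h0 : (0:Int) ≤ (ys.length : Int) + 1 - 1 := by omega
      rw [PySem.List.pyGet?_of_nonneg _ h0]
      have : ((ys.length : Int) + 1 - 1).toNat = ys.length := by omega
      rw [this, List.getElem?_append_left (by simp)]
      simp
    rw [hgettop, hgetsnd]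
    split_ifs with h
    · -- labels equal: drop last element, shrink range, use IH with accumulator shifted
      have hab : pvLabA a = pvLabA b := by simpa using h
      rw [show ((ys.length : Int) + 1 - 1) = (ys.length : Int) by ring]
      rw [loopA_drop_last _ _ _ _ (by
        intro i hi
        rw [PySem.List.mem_pyRange_neg_one] at hi
        simp only [List.length_append, List.length_map, List.length_cons, List.length_nil] at hi ⊢
        push_cast
        omega)]
      rw [loopA_acc, ih b]
      have hrev : (List.map pvLabA (ys ++ [b])).reverse
          = pvLabA b :: (List.map pvLabA ys).reverse := by simp
      rw [hrev]
      simp [sRun, sCnt, hab]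
      ring
    · have hab : pvLabA a ≠ pvLabA b := by simpa using h
      have hrev : (List.map pvLabA (ys ++ [b])).reverse
          = pvLabA b :: (List.map pvLabA ys).reverse := by simp
      rw [hrev]
      simp [sRun, sCnt, Ne.symm hab]

theorem lemmaB (ys : List Int) : ∀ a : Int,
    (ys ++ [a]).foldl pvStepB (none, 0)
      = (some (pvLabA a), sRun (pvLabA a :: (ys.map pvLabA).reverse)) := by
  induction ys using List.reverseRecOn with
  | nil =>
    intro a
    simp [pvStepB, pvLabA, sRun, sCnt]
  | append_singleton ys b ih =>
    intro a
    rw [List.foldl_append (l' := [a]), ih b]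
    simp only [List.foldl_cons, List.foldl_nil, pvStepB, pvLabA]
    by_cases hab : (if 11 ≤ a ∧ a ≤ 18 then "Tài" else "Xỉu") = (if 11 ≤ b ∧ b ≤ 18 then "Tài" else "Xỉu")
    · simp only [hab]
      simp [sRun, sCnt, pvLabA]
      split_ifs <;> ring
    · rw [if_neg (by simpa using hab)]
      simp [sRun, sCnt, pvLabA, Ne.symm hab]

-- ===== VERDICT (by name: the statement is the Claim_ definition above) =====
theorem rule6_spec : Claim_equal_rule6 := by
  intro totals _
  unfold Spec_rule6
  rcases totals.eq_nil_or_concat with rfl | ⟨ys, a, rfl⟩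
  · rfl
  · simp only [List.concat_eq_append]
    simp only [rule6, rule6_alt, List.map_append, List.map_cons, List.map_nil]
    have hlen : (((ys.map pvLabA ++ [pvLabA a]).length : Nat) : Int) - 1 = (ys.length : Int) := by
      simp
    rw [hlen, lemmaA ys a, lemmaB ys a]
    rw [PySem.List.pyGet?_neg_one_append_singleton]
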